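-- pv_equiv track=rewrite | github.com/SYBIOTE/global-coding-challenge-2021-solutions | Question4/Question4.py | totalPairs
-- ===== SOURCE A (Python) =====
-- def totalPairs(n, values):
--    count = 0
--    val_max = max(values)
--    idx_max = values.index(val_max)
--    for i in range(n):
--       if idx_max == i:
--           continue
--       if idx_max>i:
--           count+=1
--       else:
--           for j in range(i+1,n):
--              if values[j]>=values[i]:
--                 count+=1
--                 break
--       if idx_max<i:
--           count+=1
--       else:
--           for k in range(i-1,-1,-1):
--              if values[k]>=values[i]:
--                 count+=1
--                 break
--    return count
-- ===== SOURCE B (Python) =====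
-- def totalPairs(n, values):
--     val_max = max(values)
--     idx_max = values.index(val_max)
--     window = values[:max(n, 0)]
--     m = len(window)
--     pref = []
--     best = None
--     for v in window:
--         pref.append(best)
--         best = v if best is None or v > best else best
--     suf = []
--     best = None
--     for v in reversed(window):
--         suf.append(best)
--         best = v if best is None or v > best else best
--     suf.reverse()
--     count = 0
--     for i in range(m):
--         if i == idx_max:
--             continue
--         if idx_max > i or (suf[i] is not None and suf[i] >= window[i]):
--             count += 1
--         if idx_max < i or (pref[i] is not None and pref[i] >= window[i]):
--             count += 1
--     return count
-- ===== Notes on version B (the rewrite author's own statement) =====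
-- stated objective: faster
-- what changed: A rescans the list left and right of each element for a >= value; B precomputes prefix and suffix running maxima in two linear passes and answers each element's both-side tests by comparing against the stored running maximum.
-- outside the precondition, e.g. on totalPairs(2, [1]): A returns 1, B returns 0; on totalPairs(0, []): A raises ValueError, B raises ValueError
import Mathlib
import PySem

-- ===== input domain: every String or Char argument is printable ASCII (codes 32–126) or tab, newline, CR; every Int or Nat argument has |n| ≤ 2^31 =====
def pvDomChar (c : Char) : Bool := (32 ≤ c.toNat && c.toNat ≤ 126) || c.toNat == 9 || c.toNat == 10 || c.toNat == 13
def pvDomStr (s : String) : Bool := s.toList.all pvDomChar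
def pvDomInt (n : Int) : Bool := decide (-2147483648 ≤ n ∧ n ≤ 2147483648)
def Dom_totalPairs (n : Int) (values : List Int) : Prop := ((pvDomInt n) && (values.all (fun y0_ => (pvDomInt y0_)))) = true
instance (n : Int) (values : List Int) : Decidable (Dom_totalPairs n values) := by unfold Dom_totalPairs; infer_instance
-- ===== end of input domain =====

-- B replaces A's per-element inner neighbour scans by one-pass prefix/suffix running maxima (alternative algorithm).

-- ===== PORT A =====
def totalPairs (n : Int) (values : List Int) : Int :=
  let val_max := (PySem.List.max? values (fun x => x)).getD 0
  let idx_max : Int := ((PySem.List.index? values val_max).map (fun k => (k : Int))).getD 0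
  (PySem.List.pyRange 0 n 1).foldl (fun count i =>
    if idx_max == i then count
    else
      let count1 :=
        if idx_max > i then count + 1
        else if (PySem.List.pyRange (i + 1) n 1).any
                 (fun j => decide (PySem.List.pyGetD values j 0 ≥ PySem.List.pyGetD values i 0))
             then count + 1 else count
      if idx_max < i then count1 + 1
      else if (PySem.List.pyRange (i - 1) (-1) (-1)).any
               (fun k => decide (PySem.List.pyGetD values k 0 ≥ PySem.List.pyGetD values i 0))
           then count1 + 1 else count1) 0

-- ===== PORT B =====
-- pvPrefMax l best: one pass of the running maximum; k-th entry = running max of best and l[:k]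
def pvPrefMax : List Int → Option Int → List (Option Int)
  | [], _ => []
  | v :: rest, best =>
      best :: pvPrefMax rest (some (match best with | none => v | some b => max b v))

def pvOptGe (o : Option Int) (v : Int) : Bool :=
  match o with
  | some s => decide (s ≥ v)
  | none => false

def totalPairs_alt (n : Int) (values : List Int) : Int :=
  let val_max := (PySem.List.max? values (fun x => x)).getD 0
  let idx_max : Int := ((PySem.List.index? values val_max).map (fun k => (k : Int))).getD 0
  let window := PySem.List.slice values none (some (max n 0))
  let m : Int := window.length
  let pref := pvPrefMax window none
  let suf := (pvPrefMax window.reverse none).reverse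
  (PySem.List.pyRange 0 m 1).foldl (fun count i =>
    if i == idx_max then count
    else
      let count1 :=
        if decide (idx_max > i) || pvOptGe (PySem.List.pyGetD suf i none) (PySem.List.pyGetD window i 0)
        then count + 1 else count
      if decide (idx_max < i) || pvOptGe (PySem.List.pyGetD pref i none) (PySem.List.pyGetD window i 0)
      then count1 + 1 else count1) 0

-- ===== PRECONDITION & SPEC =====
-- Pre_ excludes empty lists (A's max([]) raises ValueError) and n > len(values), where A's range(n)
-- walks past the list and either raises IndexError or counts phantom positions; B clamps to the list.
def Pre_totalPairs (n : Int) (values : List Int) : Prop :=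
  values ≠ [] ∧ n ≤ (values.length : Int)
instance (n : Int) (values : List Int) : Decidable (Pre_totalPairs n values) := by
  unfold Pre_totalPairs; infer_instance
def pvWitness_totalPairs : Int × List Int := (3, [1, 2, 3])

def Spec_totalPairs (n : Int) (values : List Int) (out : Int) : Prop := out = totalPairs_alt n values
instance (n : Int) (values : List Int) (out : Int) : Decidable (Spec_totalPairs n values out) := by unfold Spec_totalPairs; infer_instance

-- ===== CLAIM (what is proved, stated in full; the proofs are below) =====
def Claim_equal_totalPairs : Prop := ∀ (n : Int) (values : List Int), Dom_totalPairs n values → Pre_totalPairs n values → Spec_totalPairs n values (totalPairs n values)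

-- ===== LEMMAS AND PROOFS =====

theorem pvOptGe_foldl (t : List Int) (b : Option Int) (v : Int) :
    pvOptGe (t.foldl (fun acc x => some (match acc with | none => x | some y => max y x)) b) v
      = (pvOptGe b v || t.any (fun x => decide (v ≤ x))) := by
  induction t generalizing b with
  | nil => simp
  | cons a t ih =>
    simp only [List.foldl_cons, ih, List.any_cons]
    cases b with
    | none => simp [pvOptGe, ge_iff_le]
    | some y =>
      rw [Bool.eq_iff_iff]
      simp only [pvOptGe, ge_iff_le, Bool.or_eq_true, decide_eq_true_eq,
        le_max_iff, List.any_eq_true]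
      tauto

theorem pvPrefMax_getElem? (l : List Int) (b : Option Int) (k : Nat) (hk : k < l.length) :
    (pvPrefMax l b)[k]? =
      some ((l.take k).foldl (fun acc x => some (match acc with | none => x | some y => max y x)) b) := by
  induction l generalizing b k with
  | nil => simp at hk
  | cons a t ih =>
    cases k with
    | zero => simp [pvPrefMax]
    | succ k =>
      simp only [pvPrefMax, List.getElem?_cons_succ, List.take_succ_cons, List.foldl_cons]
      exact ih _ k (by simpa using hk)

theorem pvPrefMax_length (l : List Int) (b : Option Int) :
    (pvPrefMax l b).length = l.length := by
  induction l generalizing b with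
  | nil => rfl
  | cons a t ih => simp [pvPrefMax, ih]

-- pyGetD through take
theorem pvGetD_take (values : List Int) (m : Nat) (j : Int) (h0 : 0 ≤ j) (hj : j < (m : Int)) :
    PySem.List.pyGetD (values.take m) j 0 = PySem.List.pyGetD values j 0 := by
  lift j to ℕ using h0
  have hj' : j < m := by exact_mod_cast hj
  rw [PySem.List.pyGetD_natCast, PySem.List.pyGetD_natCast,
    List.getD_eq_getElem?_getD, List.getD_eq_getElem?_getD, List.getElem?_take_of_lt hj']

-- A's right inner scan over a window w
theorem pvRightScan (w : List Int) (k : Nat) (v : Int) :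
    (PySem.List.pyRange ((k : Int) + 1) ((w.length : Int)) 1).any
        (fun j => decide (PySem.List.pyGetD w j 0 ≥ v))
      = (w.drop (k + 1)).any (fun x => decide (v ≤ x)) := by
  have h := PySem.List.map_pyGetD_pyRange' (xs := w) (d := 0) (a := (k : Int) + 1) (by positivity)
  have hmap : (PySem.List.pyRange ((k : Int) + 1) ((w.length : Int)) 1).any
        (fun j => decide (PySem.List.pyGetD w j 0 ≥ v))
      = ((PySem.List.pyRange ((k : Int) + 1) ((w.length : Int)) 1).map
          (fun j => PySem.List.pyGetD w j 0)).any (fun x => decide (v ≤ x)) := by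
    rw [List.any_map]; simp [ge_iff_le, Function.comp_def]
  rw [hmap, h, show ((k : Int) + 1).toNat = k + 1 by omega]

-- A's left inner scan over a window w
theorem pvLeftScan (w : List Int) (k : Nat) (hk : k ≤ w.length) (v : Int) :
    (PySem.List.pyRange ((k : Int) - 1) (-1) (-1)).any
        (fun j => decide (PySem.List.pyGetD w j 0 ≥ v))
      = (w.take k).any (fun x => decide (v ≤ x)) := by
  have hr : PySem.List.pyRange ((k : Int) - 1) (-1) (-1)
      = (PySem.List.pyRange 0 (k : Int) 1).reverse := by
    rw [PySem.List.pyRange_neg_one_eq_reverse]; norm_num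
  rw [hr, List.any_reverse]
  have hcg : (PySem.List.pyRange 0 (k : Int) 1).any
        (fun j => decide (PySem.List.pyGetD w j 0 ≥ v))
      = (PySem.List.pyRange 0 (k : Int) 1).any
        (fun j => decide (PySem.List.pyGetD (w.take k) j 0 ≥ v)) := by
    refine PySem.List.any_congr_mem ?_
    intro j hj
    rw [PySem.List.mem_pyRange_one] at hj
    rw [pvGetD_take w k j hj.1 hj.2]
  rw [hcg]
  have hlen : ((w.take k).length : Int) = (k : Int) := by
    simp [List.length_take]; omega
  rw [← hlen]
  have h := PySem.List.map_pyGetD_pyRange_zero' (xs := w.take k) (d := 0)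
  have hmap : (PySem.List.pyRange 0 (((w.take k).length : Int)) 1).any
        (fun j => decide (PySem.List.pyGetD (w.take k) j 0 ≥ v))
      = ((PySem.List.pyRange 0 (((w.take k).length : Int)) 1).map
          (fun j => PySem.List.pyGetD (w.take k) j 0)).any (fun x => decide (v ≤ x)) := by
    rw [List.any_map]; simp [ge_iff_le, Function.comp_def]
  rw [hmap, h]

-- B's suffix test
theorem pvSufTest (w : List Int) (k : Nat) (hk : k < w.length) (v : Int) :
    pvOptGe (PySem.List.pyGetD ((pvPrefMax w.reverse none).reverse) (k : Int) none) v
      = (w.drop (k + 1)).any (fun x => decide (v ≤ x)) := by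
  rw [PySem.List.pyGetD_natCast, List.getD_eq_getElem?_getD]
  have hlen : (pvPrefMax w.reverse none).length = w.length := by
    rw [pvPrefMax_length, List.length_reverse]
  have hk' : k < (pvPrefMax w.reverse none).length := by simp [hlen]; omega
  rw [List.getElem?_reverse hk']
  have hidx : (pvPrefMax w.reverse none).length - 1 - k = w.length - 1 - k := by rw [hlen]
  rw [hidx, pvPrefMax_getElem? _ _ _ (by simp; omega)]
  have htk : w.reverse.take (w.length - 1 - k) = (w.drop (k + 1)).reverse := by
    rw [List.take_reverse, show w.length - (w.length - 1 - k) = k + 1 by omega]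
  simp only [htk, Option.getD_some]
  rw [pvOptGe_foldl, List.any_reverse]
  simp [pvOptGe]

-- B's prefix test
theorem pvPrefTest (w : List Int) (k : Nat) (hk : k < w.length) (v : Int) :
    pvOptGe (PySem.List.pyGetD (pvPrefMax w none) (k : Int) none) v
      = (w.take k).any (fun x => decide (v ≤ x)) := by
  rw [PySem.List.pyGetD_natCast, List.getD_eq_getElem?_getD,
    pvPrefMax_getElem? _ _ _ hk]
  simp only [Option.getD_some]
  rw [pvOptGe_foldl]
  simp [pvOptGe]

-- ===== VERDICT (by name: the statement is the Claim_ definition above) =====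
theorem totalPairs_spec : Claim_equal_totalPairs := by
  intro n values _ hpre
  obtain ⟨hne, hlen⟩ := hpre
  unfold Spec_totalPairs totalPairs totalPairs_alt
  simp only []
  rcases Int.lt_or_le n 0 with hn | hn
  · rw [PySem.List.pyRange_one_eq_nil (by omega),
      show max n 0 = 0 from max_eq_right (by omega)]
    rw [show PySem.List.slice values none (some 0) = values.take (0:Int).toNat from
      PySem.List.slice_to values le_rfl]
    simp [PySem.List.pyRange_one_eq_nil]
  · rw [show max n 0 = n from max_eq_left hn,
      PySem.List.slice_to values hn]
    set I := ((PySem.List.index? values ((PySem.List.max? values (fun x => x)).getD 0)).map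
      (fun k => (k : Int))).getD 0 with hI
    set w := values.take n.toNat with hwdef
    have hwl : w.length = n.toNat := by
      simp [hwdef, List.length_take]
      omega
    have hwI : (w.length : Int) = n := by rw [hwl]; exact Int.toNat_of_nonneg hn
    rw [hwI]
    refine PySem.List.foldl_congr_mem' _ _ _ _ ?_
    intro i hi count
    rw [PySem.List.mem_pyRange_one] at hi
    obtain ⟨hi0, hin⟩ := hi
    lift i to ℕ using hi0 with k
    have hkw : k < w.length := by omega
    have hkn : (n.toNat : Int) = n := Int.toNat_of_nonneg hn
    -- convert A's pyGetD values to pyGetD w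
    have hvi : PySem.List.pyGetD values (k : Int) 0 = PySem.List.pyGetD w (k : Int) 0 := by
      rw [pvGetD_take values n.toNat (k : Int) (by positivity) (by omega)]
    have hAr : (PySem.List.pyRange ((k : Int) + 1) n 1).any
          (fun j => decide (PySem.List.pyGetD values j 0 ≥ PySem.List.pyGetD values (k : Int) 0))
        = (w.drop (k + 1)).any (fun x => decide (PySem.List.pyGetD w (k : Int) 0 ≤ x)) := by
      rw [← hwI]
      rw [PySem.List.any_congr_mem (g := fun j => decide (PySem.List.pyGetD w j 0 ≥ PySem.List.pyGetD w (k : Int) 0)) ?_]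
      · exact pvRightScan w k _
      · intro j hj
        rw [PySem.List.mem_pyRange_one] at hj
        have hjw := pvGetD_take values n.toNat j (by omega) (by rw [hkn]; omega)
        rw [← hwdef] at hjw
        simp only [hvi, ← hjw]
    have hAl : (PySem.List.pyRange ((k : Int) - 1) (-1) (-1)).any
          (fun j => decide (PySem.List.pyGetD values j 0 ≥ PySem.List.pyGetD values (k : Int) 0))
        = (w.take k).any (fun x => decide (PySem.List.pyGetD w (k : Int) 0 ≤ x)) := by
      rw [PySem.List.any_congr_mem (g := fun j => decide (PySem.List.pyGetD w j 0 ≥ PySem.List.pyGetD w (k : Int) 0)) ?_]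
      · exact pvLeftScan w k (le_of_lt hkw) _
      · intro j hj
        rw [PySem.List.mem_pyRange_neg_one] at hj
        have hjw := pvGetD_take values n.toNat j (by omega) (by rw [hkn]; omega)
        rw [← hwdef] at hjw
        simp only [hvi, ← hjw]
    rw [hAr, hAl, pvSufTest w k hkw, pvPrefTest w k hkw]
    simp only [beq_iff_eq]
    by_cases hik : I = (k : Int)
    · simp [hik]
    · have hik' : ¬ ((k : Int) = I) := fun h => hik h.symm
      by_cases h1 : I > (k : Int)
      · have h2 : ¬ I < (k : Int) := by omega
        simp [hik, hik', h1, h2]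
      · by_cases h2 : I < (k : Int)
        · simp [hik, hik', h1, h2]
        · exact absurd (by omega : I = (k : Int)) hik
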